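-- pv_equiv track=rewrite | github.com/GlenboLake/DailyProgrammer | C348H_square_sum_chains.py | construct_basic_chains
-- ===== SOURCE A (Python) =====
-- def construct_basic_chains(pairs):
--     simple = {k: v for k, v in pairs.items() if len(v) == 2}
--     islands = [k for k, v in pairs.items() if len(v) == 1]
--     chains = []
--     for i in islands:
--         if pairs[pairs[i][0]][0] == i:
--             chain = [i, pairs[i][0]]
--             if chain[::-1] not in chains:
--                 chains.append(chain)
--
--     while simple:
--         value = min(simple)
--         neighbors = simple.pop(value)
--         chain = [neighbors[0], value, neighbors[1]]
--         while chain[0] in simple: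
--             a, b = simple.pop(chain[0])
--             if a == chain[1]:
--                 chain.insert(0, b)
--             else:
--                 chain.insert(0, a)
--         while chain[-1] in simple:
--             a, b = simple.pop(chain[-1])
--             if a == chain[-2]:
--                 chain.append(b)
--             else:
--                 chain.append(a)
--         chains.append(chain)
--     return chains
-- ===== SOURCE B (Python) =====
-- def construct_basic_chains(pairs):
--     chains = []
--     seen = set()
--     for i, v in pairs.items():
--         if len(v) == 1:
--             j = v[0]
--             if pairs[j][0] == i and (j, i) not in seen:
--                 seen.add((i, j))
--                 chains.append([i, j])
--     simple = {k: v for k, v in pairs.items() if len(v) == 2}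
--     consumed = set()
--     for value in sorted(simple):
--         if value in consumed:
--             continue
--         consumed.add(value)
--         a, b = simple[value]
--         # walk left from a, collecting the visited nodes (reversed at the end)
--         left = []
--         cur, prev = a, value
--         while cur in simple and cur not in consumed:
--             consumed.add(cur)
--             x, y = simple[cur]
--             left.append(cur)
--             cur, prev = (y, cur) if x == prev else (x, cur)
--         # walk right from b
--         right = []
--         cur2, prev2 = b, value
--         while cur2 in simple and cur2 not in consumed:
--             consumed.add(cur2)
--             x, y = simple[cur2]
--             right.append(cur2)
--             cur2, prev2 = (y, cur2) if x == prev2 else (x, cur2)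
--         chains.append([cur] + left[::-1] + [value] + right + [cur2])
--     return chains
-- ===== Notes on version B (the rewrite author's own statement) =====
-- stated objective: alternative
-- what changed: Instead of repeatedly scanning the dict for min(simple) and popping with front-inserts and a reversed-list membership test over the chains list, B sorts the degree-2 keys once, iterates them skipping a consumed set, walks each chain into append-only lists (reversing the left part once), and dedups island pairs with a set.
import Mathlib
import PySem

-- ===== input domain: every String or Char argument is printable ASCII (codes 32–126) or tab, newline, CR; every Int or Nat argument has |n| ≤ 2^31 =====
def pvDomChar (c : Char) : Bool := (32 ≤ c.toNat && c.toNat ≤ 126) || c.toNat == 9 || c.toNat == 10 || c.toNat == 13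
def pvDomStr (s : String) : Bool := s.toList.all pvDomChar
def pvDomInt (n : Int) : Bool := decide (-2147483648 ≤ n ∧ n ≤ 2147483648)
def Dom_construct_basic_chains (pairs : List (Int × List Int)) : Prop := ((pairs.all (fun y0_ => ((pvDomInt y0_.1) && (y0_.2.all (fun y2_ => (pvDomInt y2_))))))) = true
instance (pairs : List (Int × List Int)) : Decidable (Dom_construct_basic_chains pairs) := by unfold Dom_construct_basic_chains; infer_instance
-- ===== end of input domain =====

-- B replaces A's repeated min() scans over the shrinking dict, front-inserts and reversed-list
-- membership test by one sort of the degree-2 keys, a consumed set, append-only chain walks and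
-- a set of emitted island pairs.

-- ===== PORT A =====
-- islands loop body: chain = [i, pairs[i][0]]; append unless chain[::-1] (= List.reverse, exact) already in chains
def cbcAIslandStep (d : PySem.Dict Int (List Int)) (chains : List (List Int)) (i : Int) : List (List Int) :=
  let j := PySem.List.pyGetD (d.getD i []) 0 0
  if PySem.List.pyGetD (d.getD j []) 0 0 = i then
    if [i, j].reverse ∈ chains then chains else chains ++ [[i, j]]
  else chains

-- while chain[0] in simple: pop and insert at the front (fuel = current dict size, enough as each step pops a key)
def cbcALeft : Nat → PySem.Dict Int (List Int) → List Int → PySem.Dict Int (List Int) × List Int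
  | 0, simple, chain => (simple, chain)
  | fuel+1, simple, chain =>
    if simple.contains (PySem.List.pyGetD chain 0 0) then
      let ab := simple.getD (PySem.List.pyGetD chain 0 0) []
      let simple' := simple.erase (PySem.List.pyGetD chain 0 0)
      if PySem.List.pyGetD ab 0 0 = PySem.List.pyGetD chain 1 0 then
        cbcALeft fuel simple' (PySem.List.pyGetD ab 1 0 :: chain)
      else
        cbcALeft fuel simple' (PySem.List.pyGetD ab 0 0 :: chain)
    else (simple, chain)

-- while chain[-1] in simple: pop and append
def cbcARight : Nat → PySem.Dict Int (List Int) → List Int → PySem.Dict Int (List Int) × List Int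
  | 0, simple, chain => (simple, chain)
  | fuel+1, simple, chain =>
    if simple.contains (PySem.List.pyGetD chain (-1) 0) then
      let ab := simple.getD (PySem.List.pyGetD chain (-1) 0) []
      let simple' := simple.erase (PySem.List.pyGetD chain (-1) 0)
      if PySem.List.pyGetD ab 0 0 = PySem.List.pyGetD chain (-2) 0 then
        cbcARight fuel simple' (chain ++ [PySem.List.pyGetD ab 1 0])
      else
        cbcARight fuel simple' (chain ++ [PySem.List.pyGetD ab 0 0])
    else (simple, chain)

-- while simple: value = min(simple); neighbors = simple.pop(value); extend left, then right
def cbcAMain : Nat → PySem.Dict Int (List Int) → List (List Int) → List (List Int)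
  | 0, _, chains => chains
  | fuel+1, simple, chains =>
    match PySem.List.min? simple.keys (fun k => k) with
    | none => chains
    | some value =>
      let neighbors := simple.getD value []
      let s1 := simple.erase value
      let r1 := cbcALeft s1.size s1
        [PySem.List.pyGetD neighbors 0 0, value, PySem.List.pyGetD neighbors 1 0]
      let r2 := cbcARight r1.1.size r1.1 r1.2
      cbcAMain fuel r2.1 (chains ++ [r2.2])

def construct_basic_chains (pairs : List (Int × List Int)) : List (List Int) :=
  let d : PySem.Dict Int (List Int) := PySem.Dict.mk pairs
  let simple : PySem.Dict Int (List Int) := PySem.Dict.mk (pairs.filter (fun p => p.2.length == 2))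
  let islands := (pairs.filter (fun p => p.2.length == 1)).map (fun p => p.1)
  cbcAMain simple.size simple (islands.foldl (cbcAIslandStep d) [])

-- ===== PORT B =====
-- islands pass of Source B: one fold over the items carrying (seen : set of emitted (i,j) pairs, chains)
def cbcBIslandStep (d : PySem.Dict Int (List Int)) (acc : PySem.Set (Int × Int) × List (List Int))
    (p : Int × List Int) : PySem.Set (Int × Int) × List (List Int) :=
  if p.2.length == 1 then
    let j := PySem.List.pyGetD p.2 0 0
    if PySem.List.pyGetD (d.getD j []) 0 0 = p.1 ∧ PySem.Set.contains acc.1 (j, p.1) = false then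
      (PySem.Set.add acc.1 (p.1, j), acc.2 ++ [[p.1, j]])
    else acc
  else acc

-- one chain walk of Source B: while cur in simple and cur not in consumed, collect cur and step on
def cbcBWalk : Nat → PySem.Dict Int (List Int) → PySem.Set Int → Int → Int → List Int →
    PySem.Set Int × Int × List Int
  | 0, _, c, cur, _, acc => (c, cur, acc)
  | fuel+1, s, c, cur, prev, acc =>
    if s.contains cur = true ∧ PySem.Set.contains c cur = false then
      let xy := s.getD cur []
      if PySem.List.pyGetD xy 0 0 = prev then
        cbcBWalk fuel s (PySem.Set.add c cur) (PySem.List.pyGetD xy 1 0) cur (acc ++ [cur])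
      else
        cbcBWalk fuel s (PySem.Set.add c cur) (PySem.List.pyGetD xy 0 0) cur (acc ++ [cur])
    else (c, cur, acc)

-- for value in sorted(simple): skip consumed keys, walk left from a and right from b, emit the chain
def cbcBMain (s : PySem.Dict Int (List Int)) : List Int → PySem.Set Int → List (List Int) → List (List Int)
  | [], _, chains => chains
  | k :: ks, c, chains =>
    if PySem.Set.contains c k = true then cbcBMain s ks c chains
    else
      let ab := s.getD k []
      let w1 := cbcBWalk s.size s (PySem.Set.add c k) (PySem.List.pyGetD ab 0 0) k []
      let w2 := cbcBWalk s.size s w1.1 (PySem.List.pyGetD ab 1 0) k []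
      cbcBMain s ks w2.1 (chains ++ [w1.2.1 :: w1.2.2.reverse ++ k :: w2.2.2 ++ [w2.2.1]])

def construct_basic_chains_alt (pairs : List (Int × List Int)) : List (List Int) :=
  let d : PySem.Dict Int (List Int) := PySem.Dict.mk pairs
  let island := pairs.foldl (cbcBIslandStep d) (PySem.Set.empty, [])
  let simple : PySem.Dict Int (List Int) := PySem.Dict.mk (pairs.filter (fun p => p.2.length == 2))
  cbcBMain simple (PySem.List.sorted simple.keys (fun k => k) false) PySem.Set.empty island.2

-- ===== PRECONDITION & SPEC =====
-- Pre_ requires distinct keys (the assoc list encodes a Python dict, whose keys are unique) and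
-- excludes exactly the inputs where some length-1 value points to a missing key or to a key with
-- an empty value, on which Python A raises KeyError/IndexError at pairs[pairs[i][0]][0].
def Pre_construct_basic_chains (pairs : List (Int × List Int)) : Prop :=
  (pairs.map Prod.fst).Nodup ∧
  ∀ p ∈ pairs, p.2.length = 1 → ∃ q ∈ pairs, q.1 = PySem.List.pyGetD p.2 0 0 ∧ q.2 ≠ []

instance (pairs : List (Int × List Int)) : Decidable (Pre_construct_basic_chains pairs) := by
  unfold Pre_construct_basic_chains; infer_instance

def pvWitness_construct_basic_chains : (List (Int × List Int)) := [(1, [2]), (2, [1]), (4, [5, 6]), (5, [4, 6]), (6, [5, 4])]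

def Spec_construct_basic_chains (pairs : List (Int × List Int)) (out : List (List Int)) : Prop :=
  out = construct_basic_chains_alt pairs
instance (pairs : List (Int × List Int)) (out : List (List Int)) : Decidable (Spec_construct_basic_chains pairs out) := by
  unfold Spec_construct_basic_chains; infer_instance

-- ===== CLAIM (what is proved, stated in full; the proofs are below) =====
def Claim_equal_construct_basic_chains : Prop := ∀ (pairs : List (Int × List Int)), Dom_construct_basic_chains pairs → Pre_construct_basic_chains pairs → Spec_construct_basic_chains pairs (construct_basic_chains pairs)

-- ===== LEMMAS AND PROOFS =====

-- the A-side shrinking dict, expressed from B's fixed dict s and consumed set c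
def filt (s : PySem.Dict Int (List Int)) (c : PySem.Set Int) : PySem.Dict Int (List Int) :=
  PySem.Dict.mk (s.items.filter (fun p => !(PySem.Set.contains c p.1)))

theorem set_contains_add {α : Type} [BEq α] [LawfulBEq α] (c : PySem.Set α) (k x : α) :
    PySem.Set.contains (PySem.Set.add c k) x = (PySem.Set.contains c x || x == k) := by
  unfold PySem.Set.add PySem.Set.contains
  split
  · rename_i h
    cases hx : (x == k) with
    | false => simp
    | true =>
      simp only [beq_iff_eq] at hx
      subst hx
      simp_all
  · rw [Bool.eq_iff_iff]
    simp [List.mem_append]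

theorem contains_filt (s : PySem.Dict Int (List Int)) (c : PySem.Set Int) (x : Int) :
    (filt s c).contains x = (s.contains x && !(PySem.Set.contains c x)) := by
  rw [Bool.eq_iff_iff]
  simp only [filt, PySem.Dict.contains, List.any_eq_true, List.mem_filter, Bool.and_eq_true]
  constructor
  · rintro ⟨p, ⟨hp, hq⟩, he⟩
    simp only [beq_iff_eq] at he
    subst he
    exact ⟨⟨p, hp, by simp⟩, hq⟩
  · rintro ⟨⟨p, hp, he⟩, hq⟩
    simp only [beq_iff_eq] at he
    subst he
    exact ⟨p, ⟨hp, hq⟩, by simp⟩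

theorem erase_filt (s : PySem.Dict Int (List Int)) (c : PySem.Set Int) (k : Int) :
    (filt s c).erase k = filt s (PySem.Set.add c k) := by
  simp only [filt, PySem.Dict.erase, List.filter_filter]
  congr 1
  apply List.filter_congr
  intro p _
  rw [set_contains_add]
  cases h1 : PySem.Set.contains c p.1 <;> cases h2 : (p.1 == k) <;> simp

theorem filt_empty (s : PySem.Dict Int (List Int)) : filt s PySem.Set.empty = s := by
  cases s with
  | mk items =>
    simp only [filt]
    congr 1
    apply List.filter_eq_self.mpr
    intro p _
    simp [PySem.Set.empty, PySem.Set.contains]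

theorem size_filt_le (s : PySem.Dict Int (List Int)) (c : PySem.Set Int) :
    (filt s c).size ≤ s.size := by
  simp only [filt, PySem.Dict.size]
  exact List.length_filter_le _ _

theorem find?_filter_key (l : List (Int × List Int)) (q : Int × List Int → Bool) (x : Int)
    (h : ∀ p : Int × List Int, p.1 = x → q p = true) :
    List.find? (fun p => p.1 == x) (l.filter q) = List.find? (fun p => p.1 == x) l := by
  induction l with
  | nil => rfl
  | cons p l ih =>
    by_cases hp : p.1 = x
    · rw [List.filter_cons_of_pos (h p hp)]
      rw [List.find?_cons_of_pos (by simp [hp]), List.find?_cons_of_pos (by simp [hp])]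
    · by_cases hq : q p = true
      · rw [List.filter_cons_of_pos hq, List.find?_cons_of_neg (by simp [hp]),
          List.find?_cons_of_neg (by simp [hp]), ih]
      · rw [List.filter_cons_of_neg (by simpa using hq), List.find?_cons_of_neg (by simp [hp]), ih]

theorem get?_filt (s : PySem.Dict Int (List Int)) (c : PySem.Set Int) (x : Int)
    (h : PySem.Set.contains c x = false) : (filt s c).get? x = s.get? x := by
  simp only [filt, PySem.Dict.get?]
  rw [find?_filter_key]
  intro p hp
  rw [hp, h]
  rfl

theorem size_filt_mono (s : PySem.Dict Int (List Int)) (c c' : PySem.Set Int)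
    (h : ∀ x, PySem.Set.contains c x = true → PySem.Set.contains c' x = true) :
    (filt s c').size ≤ (filt s c).size := by
  simp only [filt, PySem.Dict.size]
  apply List.Sublist.length_le
  apply List.monotone_filter_right
  intro p hp
  cases hcc : PySem.Set.contains c p.1
  · simp
  · have := h p.1 hcc
    simp [PySem.Set.contains] at this hp
    exact absurd this hp

theorem size_filt_add_lt (s : PySem.Dict Int (List Int)) (c : PySem.Set Int) (k : Int)
    (hc : PySem.Set.contains c k = false) (hs : s.contains k = true) :
    (filt s (PySem.Set.add c k)).size < (filt s c).size := by
  have he := erase_filt s c k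
  have : (filt s (PySem.Set.add c k)).size = ((filt s c).items.filter (fun p => !p.1 == k)).length := by
    rw [← he]; rfl
  rw [this]
  apply List.length_filter_lt_length_iff_exists.mpr
  have hk : (filt s c).contains k = true := by rw [contains_filt, hs, hc]; rfl
  simp only [PySem.Dict.contains, List.any_eq_true] at hk
  obtain ⟨p, hp, he2⟩ := hk
  exact ⟨p, hp, by simp_all⟩

theorem min?_foldl_aux (k : Int) :
    ∀ (xs : List Int) (acc : Option Int),
    (∀ y ∈ xs, y = k ∨ k < y) →
    ((acc = none ∨ ∃ m, acc = some m ∧ k < m) ∧ k ∈ xs) ∨ acc = some k →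
    xs.foldl (fun acc x => match acc with
      | none => some x
      | some m => if (fun z => z) x < (fun z => z) m then some x else some m) acc = some k := by
  intro xs
  induction xs with
  | nil =>
    intro acc _ h
    rcases h with ⟨_, hk⟩ | h
    · simp at hk
    · simpa using h
  | cons x xs ih =>
    intro acc hall h
    simp only [List.foldl_cons]
    apply ih
    · intro y hy; exact hall y (List.mem_cons_of_mem _ hy)
    · rcases h with ⟨hacc, hk⟩ | heq
      · rcases hall x (List.mem_cons_self) with hx | hx
        · -- x = k
          subst hx
          rcases hacc with rfl | ⟨m, rfl, hm⟩
          · right; rfl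
          · right; simp [hm]
        · -- k < x
          have hk' : k ∈ xs := by
            rcases List.mem_cons.mp hk with rfl | h'
            · omega
            · exact h'
          rcases hacc with rfl | ⟨m, rfl, hm⟩
          · left; exact ⟨Or.inr ⟨x, rfl, hx⟩, hk'⟩
          · left
            refine ⟨Or.inr ?_, hk'⟩
            by_cases hxm : x < m
            · exact ⟨x, by simp [hxm], hx⟩
            · exact ⟨m, by simp [hxm], hm⟩
      · subst heq
        right
        simp only
        have : ¬ x < k := by
          rcases hall x List.mem_cons_self with rfl | h' <;> omega
        simp [this]

theorem min?_eq_of_unique (xs : List Int) (k : Int) (hk : k ∈ xs)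
    (hmin : ∀ y ∈ xs, y = k ∨ k < y) : PySem.List.min? xs (fun z => z) = some k := by
  have := min?_foldl_aux k xs none hmin (Or.inl ⟨Or.inl rfl, hk⟩)
  unfold PySem.List.min?
  convert this using 2
  funext acc x
  cases acc with
  | none => rfl
  | some m => by_cases hxm : x < m <;> simp [hxm]

theorem getD_filt (s : PySem.Dict Int (List Int)) (c : PySem.Set Int) (x : Int)
    (h : PySem.Set.contains c x = false) : (filt s c).getD x [] = s.getD x [] := by
  rw [PySem.Dict.getD_eq_get?_getD, PySem.Dict.getD_eq_get?_getD, get?_filt s c x h]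

theorem set_contains_add_of {α : Type} [BEq α] [LawfulBEq α] (c : PySem.Set α) (k x : α)
    (h : PySem.Set.contains c x = true) : PySem.Set.contains (PySem.Set.add c k) x = true := by
  rw [set_contains_add, h]
  rfl

theorem bWalk_mono (s : PySem.Dict Int (List Int)) :
    ∀ (fuel : Nat) (c : PySem.Set Int) (cur prev : Int) (acc : List Int) (x : Int),
    PySem.Set.contains c x = true →
    PySem.Set.contains (cbcBWalk fuel s c cur prev acc).1 x = true := by
  intro fuel
  induction fuel with
  | zero => intro c cur prev acc x h; simpa [cbcBWalk] using h
  | succ n ih =>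
    intro c cur prev acc x h
    rw [cbcBWalk]
    by_cases hc : (s.contains cur = true ∧ PySem.Set.contains c cur = false)
    · rw [if_pos hc]
      simp only
      by_cases hp : PySem.List.pyGetD (s.getD cur []) 0 0 = prev
      · rw [if_pos hp]
        exact ih _ _ _ _ _ (set_contains_add_of _ _ _ h)
      · rw [if_neg hp]
        exact ih _ _ _ _ _ (set_contains_add_of _ _ _ h)
    · rw [if_neg hc]
      exact h

theorem bWalk_acc (s : PySem.Dict Int (List Int)) :
    ∀ (fuel : Nat) (c : PySem.Set Int) (cur prev : Int) (acc : List Int),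
    cbcBWalk fuel s c cur prev acc =
      ((cbcBWalk fuel s c cur prev []).1, (cbcBWalk fuel s c cur prev []).2.1,
        acc ++ (cbcBWalk fuel s c cur prev []).2.2) := by
  intro fuel
  induction fuel with
  | zero => intro c cur prev acc; simp [cbcBWalk]
  | succ n ih =>
    intro c cur prev acc
    rw [cbcBWalk, cbcBWalk]
    by_cases hc : (s.contains cur = true ∧ PySem.Set.contains c cur = false)
    · rw [if_pos hc, if_pos hc]
      simp only
      by_cases hp : PySem.List.pyGetD (s.getD cur []) 0 0 = prev
      · rw [if_pos hp, if_pos hp]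
        rw [ih _ _ _ ([] ++ [cur]), ih _ _ _ (acc ++ [cur])]
        simp
      · rw [if_neg hp, if_neg hp]
        rw [ih _ _ _ ([] ++ [cur]), ih _ _ _ (acc ++ [cur])]
        simp
    · rw [if_neg hc, if_neg hc]
      simp

theorem size_pos_of_contains (d : PySem.Dict Int (List Int)) (x : Int)
    (h : d.contains x = true) : 0 < d.size := by
  simp only [PySem.Dict.contains, List.any_eq_true] at h
  obtain ⟨p, hp, _⟩ := h
  simp only [PySem.Dict.size]
  exact List.length_pos_of_mem hp

theorem walkL_eq (s : PySem.Dict Int (List Int)) :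
    ∀ (fA : Nat) (fB : Nat) (c : PySem.Set Int) (cur prev : Int) (rest : List Int),
    (filt s c).size ≤ fA → (filt s c).size ≤ fB →
    cbcALeft fA (filt s c) (cur :: prev :: rest) =
      (filt s (cbcBWalk fB s c cur prev []).1,
        (cbcBWalk fB s c cur prev []).2.1 ::
          (cbcBWalk fB s c cur prev []).2.2.reverse ++ prev :: rest) := by
  intro fA
  induction fA with
  | zero =>
    intro fB c cur prev rest hA hB
    have hbc : ¬ (s.contains cur = true ∧ PySem.Set.contains c cur = false) := by
      rintro ⟨h1, h2⟩
      have hac : (filt s c).contains cur = true := by rw [contains_filt, h1, h2]; rfl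
      have := size_pos_of_contains _ _ hac
      omega
    rw [cbcALeft]
    cases fB with
    | zero => rw [cbcBWalk]; simp
    | succ m => rw [cbcBWalk, if_neg hbc]; simp
  | succ n ih =>
    intro fB c cur prev rest hA hB
    rw [cbcALeft]
    simp only [PySem.List.pyGetD_zero_cons]
    by_cases hbc : (s.contains cur = true ∧ PySem.Set.contains c cur = false)
    · have hac : (filt s c).contains cur = true := by rw [contains_filt, hbc.1, hbc.2]; rfl
      rw [if_pos hac]
      have hpos : 0 < (filt s c).size := size_pos_of_contains _ _ hac
      cases fB with
      | zero => omega
      | succ m =>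
        rw [cbcBWalk, if_pos hbc]
        simp only
        have h1 : PySem.List.pyGetD (cur :: prev :: rest) 1 0 = prev := by
          rw [PySem.List.pyGetD_ofNat']
          rfl
        rw [h1, getD_filt s c cur hbc.2, erase_filt]
        have hlt := size_filt_add_lt s c cur hbc.2 hbc.1
        by_cases hp : PySem.List.pyGetD (s.getD cur []) 0 0 = prev
        · rw [if_pos hp, if_pos hp]
          rw [ih m (PySem.Set.add c cur) _ cur (prev :: rest) (by omega) (by omega)]
          rw [bWalk_acc s m (PySem.Set.add c cur) (PySem.List.pyGetD (s.getD cur []) 1 0) cur ([] ++ [cur])]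
          simp
        · rw [if_neg hp, if_neg hp]
          rw [ih m (PySem.Set.add c cur) _ cur (prev :: rest) (by omega) (by omega)]
          rw [bWalk_acc s m (PySem.Set.add c cur) (PySem.List.pyGetD (s.getD cur []) 0 0) cur ([] ++ [cur])]
          simp
    · have hac : (filt s c).contains cur = false := by
        rw [contains_filt]
        cases h1 : s.contains cur with
        | false => rfl
        | true =>
          have h2 : PySem.Set.contains c cur = true := by
            by_contra h2
            exact hbc ⟨h1, by simpa using h2⟩
          rw [h2]
          rfl
      rw [if_neg (by simp [hac])]
      cases fB with
      | zero => rw [cbcBWalk]; simp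
      | succ m => rw [cbcBWalk, if_neg hbc]; simp

theorem walkR_eq (s : PySem.Dict Int (List Int)) :
    ∀ (fA : Nat) (fB : Nat) (c : PySem.Set Int) (cur prev : Int) (init : List Int),
    (filt s c).size ≤ fA → (filt s c).size ≤ fB →
    cbcARight fA (filt s c) (init ++ [prev, cur]) =
      (filt s (cbcBWalk fB s c cur prev []).1,
        init ++ prev :: (cbcBWalk fB s c cur prev []).2.2 ++ [(cbcBWalk fB s c cur prev []).2.1]) := by
  intro fA
  induction fA with
  | zero =>
    intro fB c cur prev init hA hB
    have hbc : ¬ (s.contains cur = true ∧ PySem.Set.contains c cur = false) := by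
      rintro ⟨h1, h2⟩
      have hac : (filt s c).contains cur = true := by rw [contains_filt, h1, h2]; rfl
      have := size_pos_of_contains _ _ hac
      omega
    rw [cbcARight]
    cases fB with
    | zero => rw [cbcBWalk]; simp
    | succ m => rw [cbcBWalk, if_neg hbc]; simp
  | succ n ih =>
    intro fB c cur prev init hA hB
    have hm1 : PySem.List.pyGetD (init ++ [prev, cur]) (-1) 0 = cur := by
      have hs : init ++ [prev, cur] = (init ++ [prev]) ++ [cur] := by simp
      rw [hs, PySem.List.pyGetD_neg_one_append_singleton]
    have hm2 : PySem.List.pyGetD (init ++ [prev, cur]) (-2) 0 = prev := by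
      rw [PySem.List.pyGetD_neg_ofNat _ 2 _ (by omega) (by simp)]
      have hl : (init ++ [prev, cur]).length - 2 = init.length := by simp
      simp only [hl]
      rw [List.getElem_append_right (Nat.le_refl _)]
      simp
    rw [cbcARight, hm1]
    by_cases hbc : (s.contains cur = true ∧ PySem.Set.contains c cur = false)
    · have hac : (filt s c).contains cur = true := by rw [contains_filt, hbc.1, hbc.2]; rfl
      rw [if_pos hac]
      have hpos : 0 < (filt s c).size := size_pos_of_contains _ _ hac
      cases fB with
      | zero => omega
      | succ m =>
        rw [cbcBWalk, if_pos hbc]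
        simp only
        rw [hm2, getD_filt s c cur hbc.2, erase_filt]
        have hlt := size_filt_add_lt s c cur hbc.2 hbc.1
        by_cases hp : PySem.List.pyGetD (s.getD cur []) 0 0 = prev
        · rw [if_pos hp, if_pos hp]
          have hre : (init ++ [prev, cur]) ++ [PySem.List.pyGetD (s.getD cur []) 1 0]
              = (init ++ [prev]) ++ [cur, PySem.List.pyGetD (s.getD cur []) 1 0] := by simp
          rw [hre]
          rw [ih m (PySem.Set.add c cur) _ cur (init ++ [prev]) (by omega) (by omega)]
          rw [bWalk_acc s m (PySem.Set.add c cur) (PySem.List.pyGetD (s.getD cur []) 1 0) cur ([] ++ [cur])]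
          simp
        · rw [if_neg hp, if_neg hp]
          have hre : (init ++ [prev, cur]) ++ [PySem.List.pyGetD (s.getD cur []) 0 0]
              = (init ++ [prev]) ++ [cur, PySem.List.pyGetD (s.getD cur []) 0 0] := by simp
          rw [hre]
          rw [ih m (PySem.Set.add c cur) _ cur (init ++ [prev]) (by omega) (by omega)]
          rw [bWalk_acc s m (PySem.Set.add c cur) (PySem.List.pyGetD (s.getD cur []) 0 0) cur ([] ++ [cur])]
          simp
    · have hac : (filt s c).contains cur = false := by
        rw [contains_filt]
        cases h1 : s.contains cur with
        | false => rfl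
        | true =>
          have h2 : PySem.Set.contains c cur = true := by
            by_contra h2
            exact hbc ⟨h1, by simpa using h2⟩
          rw [h2]
          rfl
      rw [if_neg (by simp [hac])]
      cases fB with
      | zero => rw [cbcBWalk]; simp
      | succ m => rw [cbcBWalk, if_neg hbc]; simp

theorem contains_true_of_filt {s : PySem.Dict Int (List Int)} {c : PySem.Set Int} {y : Int}
    (h : (filt s c).contains y = true) :
    s.contains y = true ∧ PySem.Set.contains c y = false := by
  rw [contains_filt] at h
  constructor
  · cases h1 : s.contains y
    · rw [h1] at h; simp at h
    · rfl
  · cases h2 : PySem.Set.contains c y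
    · rfl
    · rw [h2] at h; simp at h

theorem main_eq (s : PySem.Dict Int (List Int)) :
    ∀ (ks : List Int) (c : PySem.Set Int) (chains : List (List Int)) (fA : Nat),
    ks.Pairwise (· < ·) →
    (∀ k ∈ ks, s.contains k = true) →
    (∀ x, s.contains x = true → PySem.Set.contains c x = false → x ∈ ks) →
    (filt s c).size ≤ fA →
    cbcAMain fA (filt s c) chains = cbcBMain s ks c chains := by
  intro ks
  induction ks with
  | nil =>
    intro c chains fA _ _ hclose _
    have hkeys : (filt s c).keys = [] := by
      rw [List.eq_nil_iff_forall_not_mem]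
      intro x hx
      have hc := (PySem.Dict.contains_iff_mem_keys _ _).mpr hx
      obtain ⟨h1, h2⟩ := contains_true_of_filt hc
      exact absurd (hclose x h1 h2) (List.not_mem_nil)
    rw [cbcBMain]
    cases fA with
    | zero => rw [cbcAMain]
    | succ n =>
      rw [cbcAMain, (PySem.List.min?_eq_none_iff _ _).mpr hkeys]
  | cons k ks ih =>
    intro c chains fA hPW hmem hclose hfuel
    rw [cbcBMain]
    by_cases hck : PySem.Set.contains c k = true
    · rw [if_pos hck]
      apply ih c chains fA (List.pairwise_cons.mp hPW).2
        (fun x hx => hmem x (List.mem_cons_of_mem _ hx)) _ hfuel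
      intro x h1 h2
      rcases List.mem_cons.mp (hclose x h1 h2) with rfl | hx
      · rw [hck] at h2; cases h2
      · exact hx
    · rw [if_neg hck]
      simp only
      have hck' : PySem.Set.contains c k = false := by simpa using hck
      have hsk : s.contains k = true := hmem k List.mem_cons_self
      have hfk : (filt s c).contains k = true := by rw [contains_filt, hsk, hck']; rfl
      have hpos := size_pos_of_contains _ _ hfk
      cases fA with
      | zero => omega
      | succ n =>
        rw [cbcAMain]
        have hmin : PySem.List.min? (filt s c).keys (fun z => z) = some k := by
          apply min?_eq_of_unique
          · exact (PySem.Dict.contains_iff_mem_keys _ _).mp hfk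
          · intro y hy
            obtain ⟨h1, h2⟩ := contains_true_of_filt
              ((PySem.Dict.contains_iff_mem_keys _ _).mpr hy)
            rcases List.mem_cons.mp (hclose y h1 h2) with rfl | hmem'
            · left; rfl
            · right; exact (List.pairwise_cons.mp hPW).1 y hmem'
        rw [hmin]
        simp only
        rw [getD_filt s c k hck', erase_filt]
        have hB1 : (filt s (PySem.Set.add c k)).size ≤ s.size := size_filt_le s _
        rw [walkL_eq s ((filt s (PySem.Set.add c k)).size) (s.size) (PySem.Set.add c k)
          (PySem.List.pyGetD (s.getD k []) 0 0) k [PySem.List.pyGetD (s.getD k []) 1 0]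
          le_rfl hB1]
        simp only
        -- name the two B walks
        set W1 := cbcBWalk s.size s (PySem.Set.add c k) (PySem.List.pyGetD (s.getD k []) 0 0) k []
          with hW1
        have hshape : W1.2.1 :: W1.2.2.reverse ++ k :: [PySem.List.pyGetD (s.getD k []) 1 0]
            = (W1.2.1 :: W1.2.2.reverse) ++ [k, PySem.List.pyGetD (s.getD k []) 1 0] := by simp
        rw [hshape]
        have hmono1 : ∀ x, PySem.Set.contains (PySem.Set.add c k) x = true →
            PySem.Set.contains W1.1 x = true := by
          intro x hx
          exact bWalk_mono s _ _ _ _ _ _ hx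
        have hB2 : (filt s W1.1).size ≤ s.size := size_filt_le s _
        rw [walkR_eq s ((filt s W1.1).size) (s.size) W1.1
          (PySem.List.pyGetD (s.getD k []) 1 0) k (W1.2.1 :: W1.2.2.reverse) le_rfl hB2]
        set W2 := cbcBWalk s.size s W1.1 (PySem.List.pyGetD (s.getD k []) 1 0) k [] with hW2
        have hmono2 : ∀ x, PySem.Set.contains W1.1 x = true →
            PySem.Set.contains W2.1 x = true := by
          intro x hx
          exact bWalk_mono s _ _ _ _ _ _ hx
        have hchain : (W1.2.1 :: W1.2.2.reverse) ++ k :: W2.2.2 ++ [W2.2.1]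
            = W1.2.1 :: W1.2.2.reverse ++ k :: W2.2.2 ++ [W2.2.1] := by simp
        rw [hchain]
        apply ih
        · exact (List.pairwise_cons.mp hPW).2
        · exact fun x hx => hmem x (List.mem_cons_of_mem _ hx)
        · intro x h1 h2
          have hcx : PySem.Set.contains c x = false := by
            cases hcc : PySem.Set.contains c x
            · rfl
            · have : PySem.Set.contains W2.1 x = true :=
                hmono2 x (hmono1 x (set_contains_add_of _ _ _ hcc))
              rw [this] at h2; cases h2
          rcases List.mem_cons.mp (hclose x h1 hcx) with rfl | hx
          · exfalso
            have hkin : PySem.Set.contains (PySem.Set.add c x) x = true := by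
              rw [set_contains_add]; simp
            have : PySem.Set.contains W2.1 x = true := hmono2 x (hmono1 x hkin)
            rw [this] at h2; cases h2
          · exact hx
        · have hle : (filt s W2.1).size ≤ (filt s (PySem.Set.add c k)).size := by
            apply size_filt_mono
            intro x hx
            exact hmono2 x (hmono1 x hx)
          have hlt := size_filt_add_lt s c k hck' hsk
          omega

theorem islands_eq (d : PySem.Dict Int (List Int)) :
    ∀ (l : List (Int × List Int)) (seen : PySem.Set (Int × Int)) (chains : List (List Int)),
    (∀ p ∈ l, d.get? p.1 = some p.2) →
    (∀ x y : Int, PySem.Set.contains seen (x, y) = true ↔ [x, y] ∈ chains) →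
    ((l.filter (fun p => p.2.length == 1)).map (fun p => p.1)).foldl (cbcAIslandStep d) chains
      = (l.foldl (cbcBIslandStep d) (seen, chains)).2 := by
  intro l
  induction l with
  | nil => intro seen chains _ _; rfl
  | cons p l ihl =>
    intro seen chains hget hinv
    rw [List.foldl_cons]
    cases hl1 : (p.2.length == 1) with
    | false =>
      have hfc : List.filter (fun q => q.2.length == 1) (p :: l)
          = List.filter (fun q => q.2.length == 1) l := by
        simp [hl1]
      rw [hfc]
      have hb : cbcBIslandStep d (seen, chains) p = (seen, chains) := by
        unfold cbcBIslandStep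
        rw [if_neg (by simp [hl1])]
      rw [hb]
      exact ihl seen chains (fun q hq => hget q (List.mem_cons_of_mem _ hq)) hinv
    | true =>
      have hfc : List.filter (fun q => q.2.length == 1) (p :: l)
          = p :: List.filter (fun q => q.2.length == 1) l := by
        simp [hl1]
      rw [hfc]
      simp only [List.map_cons, List.foldl_cons]
      have hgd : d.getD p.1 [] = p.2 := by
        rw [PySem.Dict.getD_eq_get?_getD, hget p List.mem_cons_self]
        rfl
      unfold cbcAIslandStep cbcBIslandStep
      rw [if_pos hl1]
      simp only [hgd]
      by_cases hcnd : PySem.List.pyGetD (d.getD (PySem.List.pyGetD p.2 0 0) []) 0 0 = p.1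
      · rw [if_pos hcnd]
        by_cases hin : [p.1, PySem.List.pyGetD p.2 0 0].reverse ∈ chains
        · rw [if_pos hin]
          have hsn : PySem.Set.contains seen (PySem.List.pyGetD p.2 0 0, p.1) = true :=
            (hinv _ _).mpr (by simpa using hin)
          rw [if_neg (by
            rintro ⟨-, h2⟩
            rw [hsn] at h2
            cases h2)]
          exact ihl seen chains (fun q hq => hget q (List.mem_cons_of_mem _ hq)) hinv
        · rw [if_neg hin]
          have hsn : PySem.Set.contains seen (PySem.List.pyGetD p.2 0 0, p.1) = false := by
            cases hzz : PySem.Set.contains seen (PySem.List.pyGetD p.2 0 0, p.1)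
            · rfl
            · exact absurd ((hinv _ _).mp hzz) (by simpa using hin)
          rw [if_pos ⟨hcnd, hsn⟩]
          apply ihl _ _ (fun q hq => hget q (List.mem_cons_of_mem _ hq))
          intro x y
          rw [set_contains_add]
          simp only [Bool.or_eq_true, beq_iff_eq, List.mem_append, List.mem_singleton]
          constructor
          · rintro (h | h)
            · left; exact (hinv x y).mp h
            · right
              rw [Prod.ext_iff] at h
              obtain ⟨h1, h2⟩ := h
              simp only at h1 h2
              rw [h1, h2]
          · rintro (h | h)
            · left; exact (hinv x y).mpr h
            · right
              simp only [List.cons.injEq, and_true] at h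
              rw [Prod.ext_iff]
              exact ⟨h.1, h.2⟩
      · rw [if_neg hcnd, if_neg (by simp [hcnd])]
        exact ihl seen chains (fun q hq => hget q (List.mem_cons_of_mem _ hq)) hinv

-- ===== VERDICT (by name: the statement is the Claim_ definition above) =====
theorem construct_basic_chains_spec : Claim_equal_construct_basic_chains := by
  intro pairs _ hpre
  obtain ⟨hnd, -⟩ := hpre
  unfold Spec_construct_basic_chains construct_basic_chains construct_basic_chains_alt
  simp only
  have hnd' : (PySem.Dict.mk pairs).keys.Nodup := by
    rw [PySem.Dict.keys_mk]
    simpa [Function.comp] using hnd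
  have hisl := islands_eq (PySem.Dict.mk pairs) pairs PySem.Set.empty []
    (fun p hp => PySem.Dict.get?_of_mem_items _ hp hnd')
    (by intro x y; simp [PySem.Set.empty, PySem.Set.contains])
  rw [← hisl]
  have hnds : (PySem.Dict.mk (pairs.filter (fun p => p.2.length == 2))).keys.Nodup := by
    rw [PySem.Dict.keys_mk]
    apply List.Nodup.sublist _ (by simpa [Function.comp] using hnd)
    exact List.filter_sublist.map _
  have hPW : (PySem.List.sorted (PySem.Dict.mk (pairs.filter (fun p => p.2.length == 2))).keys
      (fun k => k) false).Pairwise (· < ·) := by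
    have h1 := PySem.List.sorted_pairwise
      (PySem.Dict.mk (pairs.filter (fun p => p.2.length == 2))).keys (fun k => k)
    have h2 : (PySem.List.sorted (PySem.Dict.mk (pairs.filter (fun p => p.2.length == 2))).keys
        (fun k => k) false).Nodup :=
      (PySem.List.sorted_perm _ _ _).nodup_iff.mpr hnds
    exact (h1.and h2).imp (fun hab => lt_of_le_of_ne hab.1 hab.2)
  have hmain := main_eq (PySem.Dict.mk (pairs.filter (fun p => p.2.length == 2)))
    (PySem.List.sorted (PySem.Dict.mk (pairs.filter (fun p => p.2.length == 2))).keys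
      (fun k => k) false)
    PySem.Set.empty
    (List.foldl (cbcAIslandStep (PySem.Dict.mk pairs)) []
      (List.map (fun p => p.1) (List.filter (fun p => p.2.length == 1) pairs)))
    (PySem.Dict.mk (pairs.filter (fun p => p.2.length == 2))).size
    hPW
    (fun k hk => (PySem.Dict.contains_iff_mem_keys _ _).mpr
      ((PySem.List.mem_sorted _ _ _ _).mp hk))
    (fun x hx _ => (PySem.List.mem_sorted _ _ _ _).mpr
      ((PySem.Dict.contains_iff_mem_keys _ _).mp hx))
    (by rw [filt_empty])
  rw [filt_empty] at hmain
  exact hmain
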